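-- pv_equiv track=rewrite | github.com/JP-Out/tcc-interfaces | tools/visualization/svg_utils.py | normalize_file_stem
-- ===== SOURCE A (Python) =====
-- def normalize_file_stem(value: str) -> str:
--     allowed = {"-", "_"}
--     normalized = "".join(
--         character.lower()
--         if character.isalnum() or character in allowed
--         else "-"
--         for character in value
--     )
--     return "-".join(part for part in normalized.split("-") if part)
-- ===== SOURCE B (Python) =====
-- def normalize_file_stem(value: str) -> str:
--     out = []
--     pending = False
--     for character in value:
--         if character.isalnum() or character in "-_":
--             c = character.lower()
--         else:
--             c = "-"
--         if c == "-":
--             pending = True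
--         else:
--             if pending and out:
--                 out.append("-")
--             pending = False
--             out.append(c)
--     return "".join(out)
-- ===== Notes on version B (the rewrite author's own statement) =====
-- stated objective: alternative
-- what changed: Replaces the build-intermediate-string / split-on-hyphen / filter / rejoin pipeline with a single fused pass that keeps a pending-hyphen flag, emitting at most one separating hyphen and never materialising the intermediate string or the list of parts.
import Mathlib
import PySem

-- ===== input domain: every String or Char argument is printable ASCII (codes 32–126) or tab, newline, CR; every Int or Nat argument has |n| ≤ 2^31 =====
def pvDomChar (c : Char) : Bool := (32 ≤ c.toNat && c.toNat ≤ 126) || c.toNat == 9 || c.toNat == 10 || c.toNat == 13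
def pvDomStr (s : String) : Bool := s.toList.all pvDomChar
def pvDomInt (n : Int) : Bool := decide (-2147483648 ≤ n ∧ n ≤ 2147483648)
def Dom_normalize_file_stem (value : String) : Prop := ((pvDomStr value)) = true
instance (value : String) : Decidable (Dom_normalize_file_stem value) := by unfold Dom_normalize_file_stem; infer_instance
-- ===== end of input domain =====

-- B fuses A's map / split('-') / filter / rejoin pipeline into one pass with a pending-hyphen flag (alternative decomposition, same O(n) cost).

-- ===== PORT A =====
def normalize_file_stem (value : String) : String :=
  let allowed : PySem.Set Char := PySem.Set.ofList ['-', '_']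
  let normalized : List Char :=
    PySem.Chars.join []
      (value.toList.map (fun character =>
        if PySem.Chars.isalnum character ∨ character ∈ allowed
        then [PySem.Chars.lowerChar character] else ['-']))
  String.mk
    (PySem.Chars.join ['-']
      ((PySem.Chars.splitOn normalized ['-']).filter (fun part => !part.isEmpty)))

-- ===== PORT B =====
def nfsAltStep (st : List Char × Bool) (character : Char) : List Char × Bool :=
  let c : Char :=
    if PySem.Chars.isalnum character || character == '-' || character == '_'
    then PySem.Chars.lowerChar character else '-'
  if c == '-' then (st.1, true)
  else if st.2 && !st.1.isEmpty then (st.1 ++ ['-', c], false)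
  else (st.1 ++ [c], false)

def normalize_file_stem_alt (value : String) : String :=
  String.mk (value.toList.foldl nfsAltStep ([], false)).1

-- ===== PRECONDITION & SPEC =====
def Spec_normalize_file_stem (value : String) (out : String) : Prop := out = normalize_file_stem_alt value
instance (value : String) (out : String) : Decidable (Spec_normalize_file_stem value out) := by unfold Spec_normalize_file_stem; infer_instance

-- ===== CLAIM (what is proved, stated in full; the proofs are below) =====
def Claim_equal_normalize_file_stem : Prop := ∀ (value : String), Dom_normalize_file_stem value → Spec_normalize_file_stem value (normalize_file_stem value)

-- ===== LEMMAS AND PROOFS =====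

-- the shared per-character mapping both programs apply
def nfsMap (c : Char) : Char :=
  if PySem.Chars.isalnum c || c == '-' || c == '_' then PySem.Chars.lowerChar c else '-'

-- reference split on '-' (Python str.split("-") on a char list)
def splitD : List Char → List (List Char)
  | [] => [[]]
  | c :: t => if c = '-' then [] :: splitD t else (splitD t).modifyHead (c :: ·)

-- each nonempty part prefixed by a hyphen
def ji (parts : List (List Char)) : List Char :=
  (parts.filter (fun x => !x.isEmpty)).flatMap (fun x => '-' :: x)

-- B's collapsing emitter once output is nonempty
def gG : Bool → List Char → List Char
  | _, [] => []
  | p, c :: t => if c = '-' then gG true t else (if p then ['-'] else []) ++ c :: gG false t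

-- B's behaviour from the empty output
def leadG : List Char → List Char
  | [] => []
  | c :: t => if c = '-' then leadG t else c :: gG false t

-- B's step on an already-mapped character
def step2 (st : List Char × Bool) (c : Char) : List Char × Bool :=
  if c == '-' then (st.1, true)
  else if st.2 && !st.1.isEmpty then (st.1 ++ ['-', c], false)
  else (st.1 ++ [c], false)

theorem splitD_ne_nil (t : List Char) : splitD t ≠ [] := by
  induction t with
  | nil => simp [splitD]
  | cons c r ih =>
    simp only [splitD]
    split
    · simp
    · cases h : splitD r with
      | nil => exact absurd h ih
      | cons a b => simp [List.modifyHead]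

theorem splitOn_go_spec : ∀ (l : List Char) (fuel : Nat) (cur : List Char) (acc : List (List Char)),
    l.length < fuel →
    PySem.Chars.splitOn.go ['-'] fuel l cur acc = acc.reverse ++ (splitD l).modifyHead (cur.reverse ++ ·) := by
  intro l
  induction l with
  | nil =>
    intro fuel cur acc h
    cases fuel with
    | zero => omega
    | succ f => simp [PySem.Chars.splitOn.go, splitD, List.modifyHead]
  | cons c r ih =>
    intro fuel cur acc h
    cases fuel with
    | zero => simp at h
    | succ f =>
      by_cases hc : c = '-'
      · subst hc
        have hpre : (['-'] : List Char).isPrefixOf ('-' :: r) = true := by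
          simp [List.isPrefixOf]
        simp only [PySem.Chars.splitOn.go, hpre, if_pos]
        simp only [List.length_cons, List.length_nil, List.drop_succ_cons, List.drop_zero]
        rw [ih f [] (cur.reverse :: acc) (by simp at h ⊢; omega)]
        simp only [splitD, if_pos rfl, List.modifyHead, List.reverse_cons, List.reverse_nil,
          List.nil_append, List.append_assoc, List.cons_append, List.singleton_append]
        cases hs : splitD r <;> simp [List.modifyHead]
      · have hpre : (['-'] : List Char).isPrefixOf (c :: r) = false := by
          simp [List.isPrefixOf]
          exact fun hcc => absurd hcc.symm hc
        simp only [PySem.Chars.splitOn.go, hpre, Bool.false_eq_true, if_false]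
        rw [ih f (c :: cur) acc (by simp at h ⊢; omega)]
        cases hs : splitD r with
        | nil => exact absurd hs (splitD_ne_nil r)
        | cons a b => simp [splitD, hc, hs, List.modifyHead]

theorem splitOn_eq_splitD (s : List Char) : PySem.Chars.splitOn s ['-'] = splitD s := by
  show PySem.Chars.splitOn.go ['-'] (s.length + 1) s [] [] = splitD s
  rw [splitOn_go_spec s (s.length + 1) [] [] (by omega)]
  cases hs : splitD s <;> simp [List.modifyHead]

theorem gG_spec (t : List Char) :
    gG true t = ji (splitD t) ∧ gG false t = (splitD t).headI ++ ji (splitD t).tail := by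
  induction t with
  | nil => simp [gG, splitD, ji]
  | cons c r ih =>
    by_cases hc : c = '-'
    · subst hc
      refine ⟨?_, ?_⟩ <;> simp [gG, splitD, ji, ih.1]
    · obtain ⟨h', rest', hsp⟩ : ∃ h' rest', splitD r = h' :: rest' := by
        cases h : splitD r with
        | nil => exact absurd h (splitD_ne_nil r)
        | cons a b => exact ⟨a, b, rfl⟩
      have h2 := ih.2
      rw [hsp] at h2
      simp only [List.headI, List.tail] at h2
      refine ⟨?_, ?_⟩ <;>
        simp [gG, splitD, hc, hsp, ji, List.modifyHead, h2]

theorem intercalate_cons_flatMap (x : List Char) (ys : List (List Char)) :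
    List.intercalate ['-'] (x :: ys) = x ++ ys.flatMap (fun y => '-' :: y) := by
  induction ys generalizing x with
  | nil => simp [List.intercalate]
  | cons y ys' ih =>
    have hstep : List.intercalate ['-'] (x :: y :: ys') =
        x ++ ['-'] ++ List.intercalate ['-'] (y :: ys') := by
      simp [List.intercalate, List.intersperse]
    rw [hstep, ih y]
    simp

theorem leadG_spec (s : List Char) :
    leadG s = PySem.Chars.join ['-'] ((splitD s).filter (fun x => !x.isEmpty)) := by
  induction s with
  | nil => simp [leadG, splitD, PySem.Chars.join, List.intercalate]
  | cons c r ih =>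
    by_cases hc : c = '-'
    · subst hc; simp [leadG, splitD, ih]
    · obtain ⟨h', rest', hsp⟩ : ∃ h' rest', splitD r = h' :: rest' := by
        cases h : splitD r with
        | nil => exact absurd h (splitD_ne_nil r)
        | cons a b => exact ⟨a, b, rfl⟩
      have h2 := (gG_spec r).2
      rw [hsp] at h2
      simp only [List.headI, List.tail] at h2
      simp only [leadG, splitD, hc, hsp, List.modifyHead, if_neg hc]
      simp [PySem.Chars.join, intercalate_cons_flatMap, h2, ji]

theorem foldl_step2_ne (t : List Char) : ∀ (o : List Char) (p : Bool), o ≠ [] →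
    (t.foldl step2 (o, p)).1 = o ++ gG p t := by
  induction t with
  | nil => intro o p _; simp [gG]
  | cons c r ih =>
    intro o p ho
    by_cases hc : c = '-'
    · subst hc
      simp only [List.foldl_cons, step2, if_pos rfl, gG]
      simpa using ih o true ho
    · have hne : o.isEmpty = false := by simpa [List.isEmpty_iff] using ho
      cases p with
      | false =>
        simp only [List.foldl_cons, step2, beq_iff_eq, if_neg hc, hne, Bool.false_and,
          Bool.false_eq_true, if_false]
        rw [ih (o ++ [c]) false (by simp)]
        simp [gG, hc]
      | true =>
        simp only [List.foldl_cons, step2, beq_iff_eq, if_neg hc, hne, Bool.true_and,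
          Bool.not_false, if_pos]
        rw [ih (o ++ ['-', c]) false (by simp)]
        simp [gG, hc]

theorem foldl_step2_nil (t : List Char) : ∀ (p : Bool),
    (t.foldl step2 ([], p)).1 = leadG t := by
  induction t with
  | nil => intro p; simp [leadG]
  | cons c r ih =>
    intro p
    by_cases hc : c = '-'
    · subst hc
      simp only [List.foldl_cons, step2, if_pos rfl, leadG]
      exact ih true
    · simp only [List.foldl_cons, step2, beq_iff_eq, if_neg hc, List.isEmpty_nil, Bool.not_true,
        Bool.and_false, Bool.false_eq_true, if_false, List.nil_append, leadG]
      rw [foldl_step2_ne r [c] false (by simp)]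
      simp [leadG, hc]

theorem nfsAltStep_eq_step2 (st : List Char × Bool) (ch : Char) :
    nfsAltStep st ch = step2 st (nfsMap ch) := by
  simp only [nfsAltStep, step2, nfsMap]

theorem mapA_eq (character : Char) :
    (if PySem.Chars.isalnum character ∨ character ∈ PySem.Set.ofList ['-', '_']
     then ([PySem.Chars.lowerChar character] : List Char) else ['-']) = [nfsMap character] := by
  by_cases ha : PySem.Chars.isalnum character = true
  · simp [ha, nfsMap]
  · by_cases hd : character = '-'
    · subst hd
      simp [nfsMap, PySem.Set.mem_ofList, ha, show PySem.Chars.lowerChar '-' = '-' from by decide]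
    · by_cases hu : character = '_'
      · subst hu
        simp [nfsMap, PySem.Set.mem_ofList, ha, show PySem.Chars.lowerChar '_' = '_' from by decide]
      · have : character ∉ PySem.Set.ofList ['-', '_'] := by
          rw [PySem.Set.mem_ofList]; simp [hd, hu]
        simp [nfsMap, ha, hd, hu, this]

-- ===== VERDICT (by name: the statement is the Claim_ definition above) =====
theorem normalize_file_stem_spec : Claim_equal_normalize_file_stem := by
  intro value _
  unfold Spec_normalize_file_stem normalize_file_stem normalize_file_stem_alt
  apply congrArg String.mk
  have hmapfun :
      (fun character => if PySem.Chars.isalnum character ∨ character ∈ PySem.Set.ofList ['-', '_']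
        then ([PySem.Chars.lowerChar character] : List Char) else ['-'])
      = fun character => [nfsMap character] := funext mapA_eq
  rw [hmapfun]
  have hjoin : PySem.Chars.join [] (value.toList.map (fun character => [nfsMap character]))
      = value.toList.map nfsMap := by
    rw [show (fun character => [nfsMap character]) = (fun c => [c]) ∘ nfsMap from rfl,
      ← List.map_map]
    exact PySem.Chars.join_nil_singletons _
  rw [hjoin, splitOn_eq_splitD, ← leadG_spec]
  have hfold : value.toList.foldl nfsAltStep ([], false)
      = (value.toList.map nfsMap).foldl step2 ([], false) := by
    rw [List.foldl_map]
    exact congrFun (congrFun (congrArg List.foldl (funext fun st => funext fun ch =>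
      (nfsAltStep_eq_step2 st ch))) ([], false)) value.toList
  rw [hfold, foldl_step2_nil]
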